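-- pv_equiv track=rewrite | github.com/xsaiter/isasln | src/olymp/acmp/020/0960/sol.py | solve
-- ===== SOURCE A (Python) =====
-- def solve(s: str) -> int:
--     dp_a = 0
--     dp_b = 0
--     dp_c = 0
--     for c in s:
--         if c == "a":
--             dp_a += 1
--         elif c == "b":
--             dp_b += dp_a
--         elif c == "c":
--             dp_c += dp_b
--     return dp_c
-- ===== SOURCE B (Python) =====
-- def solve(s: str) -> int:
--     # count subsequences "abc" by fixing the middle 'b':
--     # for each 'b', add (#'a' before it) * (#'c' after it)
--     c_remaining = 0
--     for ch in s:
--         if ch == "c":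
--             c_remaining += 1
--     a_before = 0
--     total = 0
--     for ch in s:
--         if ch == "c":
--             c_remaining -= 1
--         elif ch == "b":
--             total += a_before * c_remaining
--         elif ch == "a":
--             a_before += 1
--     return total
-- ===== Notes on version B (the rewrite author's own statement) =====
-- stated objective: alternative
-- what changed: Replaced the three-register forward DP (dp_a->dp_b->dp_c chain) by counting per middle 'b': precount the 'c's, then one pass adds a_before * c_remaining at each 'b'.
import Mathlib
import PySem

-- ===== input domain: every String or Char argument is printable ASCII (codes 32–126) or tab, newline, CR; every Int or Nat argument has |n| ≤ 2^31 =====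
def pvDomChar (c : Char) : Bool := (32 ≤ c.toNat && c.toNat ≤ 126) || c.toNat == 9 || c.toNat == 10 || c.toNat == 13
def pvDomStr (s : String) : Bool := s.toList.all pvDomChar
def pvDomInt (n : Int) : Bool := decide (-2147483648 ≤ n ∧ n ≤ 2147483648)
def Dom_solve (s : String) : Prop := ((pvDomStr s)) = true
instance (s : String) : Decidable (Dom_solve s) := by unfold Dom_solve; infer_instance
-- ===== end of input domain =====

-- B counts the "abc" subsequences per middle 'b' (prefix-'a' count × suffix-'c' count)
-- instead of A's dp_a → dp_b → dp_c forward chain; same O(n) cost, alternative algorithm.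

-- ===== PORT A =====
-- one pass: state (dp_a, dp_b, dp_c)
def solveStep (st : Int × Int × Int) (c : Char) : Int × Int × Int :=
  if c == 'a' then (st.1 + 1, st.2.1, st.2.2)
  else if c == 'b' then (st.1, st.2.1 + st.1, st.2.2)
  else if c == 'c' then (st.1, st.2.1, st.2.2 + st.2.1)
  else st

def solve (s : String) : Int :=
  (s.toList.foldl solveStep (0, 0, 0)).2.2

-- ===== PORT B =====
-- first pass: count the 'c's
def altCount (s : String) : Int :=
  s.toList.foldl (fun acc ch => if ch == 'c' then acc + 1 else acc) 0

-- second pass: state (a_before, c_remaining, total)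
def altStep (st : Int × Int × Int) (ch : Char) : Int × Int × Int :=
  if ch == 'c' then (st.1, st.2.1 - 1, st.2.2)
  else if ch == 'b' then (st.1, st.2.1, st.2.2 + st.1 * st.2.1)
  else if ch == 'a' then (st.1 + 1, st.2.1, st.2.2)
  else st

def solve_alt (s : String) : Int :=
  (s.toList.foldl altStep (0, altCount s, 0)).2.2

-- ===== PRECONDITION & SPEC =====
def Spec_solve (s : String) (out : Int) : Prop := out = solve_alt s
instance (s : String) (out : Int) : Decidable (Spec_solve s out) := by unfold Spec_solve; infer_instance

-- ===== CLAIM (what is proved, stated in full; the proofs are below) =====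
def Claim_equal_solve : Prop := ∀ (s : String), Dom_solve s → Spec_solve s (solve s)

-- ===== LEMMAS AND PROOFS =====

-- Core invariant: starting B's fold with c_remaining = (#'c' in l), its total advances by
-- exactly A's dp_c advance minus the pairs whose 'b' was already counted in the initial dp_b.
theorem fold_rel (l : List Char) : ∀ (a b c res : Int),
    (l.foldl altStep (a, (l.count 'c' : Int), res)).2.2
      = res + ((l.foldl solveStep (a, b, c)).2.2 - c) - b * (l.count 'c' : Int) := by
  induction l with
  | nil => intro a b c res; simp [List.foldl]
  | cons ch t ih =>
    intro a b c res
    by_cases ha : ch = 'a'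
    · subst ha
      simp only [List.foldl, List.count_cons, solveStep, altStep,
        show (('a':Char) == 'a') = true from rfl,
        show (('a':Char) == 'c') = false from rfl,
        show (('a':Char) == 'b') = false from rfl, if_true, if_false,
        show (('a':Char) = 'c') = False from by simp, decide_eq_true_eq]
      norm_num
      rw [ih (a + 1) b c res]
    · by_cases hb : ch = 'b'
      · subst hb
        simp only [List.foldl, List.count_cons, solveStep, altStep,
          show (('b':Char) == 'a') = false from rfl,
          show (('b':Char) == 'b') = true from rfl,
          show (('b':Char) == 'c') = false from rfl, if_true, if_false,
          show (('b':Char) = 'c') = False from by simp, decide_eq_true_eq]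
        norm_num
        rw [ih a (b + a) c (res + a * (t.count 'c' : Int))]
        ring
      · by_cases hc : ch = 'c'
        · subst hc
          simp only [List.foldl, List.count_cons, solveStep, altStep,
            show (('c':Char) == 'a') = false from rfl,
            show (('c':Char) == 'b') = false from rfl,
            show (('c':Char) == 'c') = true from rfl, if_true, if_false,
            show (('c':Char) = 'c') = True from by simp, decide_eq_true_eq]
          norm_num
          rw [ih a b (c + b) res]
          push_cast
          ring
        · have ba : (ch == 'a') = false := by simp [ha]
          have bb : (ch == 'b') = false := by simp [hb]
          have bc : (ch == 'c') = false := by simp [hc]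
          simp only [List.foldl, List.count_cons, solveStep, altStep,
            ba, bb, bc, Bool.false_eq_true, if_false, Nat.add_zero]
          rw [ih a b c res]

theorem altCount_eq (s : String) : altCount s = (s.toList.count 'c' : Int) := by
  unfold altCount
  rw [PySem.List.foldl_beq_add_one]
  ring

-- ===== VERDICT (by name: the statement is the Claim_ definition above) =====
theorem solve_spec : Claim_equal_solve := by
  intro s _
  unfold Spec_solve solve solve_alt
  rw [altCount_eq, fold_rel s.toList 0 0 0 0]
  ring
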